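-- pv_equiv track=rewrite | github.com/Anthony1024101/techdegree-project-3 | phrasehunter/phrase.py | set_letter
-- ===== SOURCE A (Python) =====
-- def set_letter(phrase):
--     map = {}
--     for index, letter in enumerate(phrase):
--         try:
--             map[letter].append(index)
--         except KeyError:
--             map[letter] = list()
--             map[letter].append(index)
--     return map
-- ===== SOURCE B (Python) =====
-- def set_letter(phrase):
--     return {letter: [i for i, c in enumerate(phrase) if c == letter]
--             for letter in dict.fromkeys(phrase)}
-- ===== Notes on version B (the rewrite author's own statement) =====
-- stated objective: idiomatic
-- what changed: A builds the dict in one accumulating pass with try/except appends; B first takes the distinct letters in first-appearance order (dict.fromkeys) and then gathers each letter's index list by a comprehension scanning the phrase once per distinct letter.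
import Mathlib
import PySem

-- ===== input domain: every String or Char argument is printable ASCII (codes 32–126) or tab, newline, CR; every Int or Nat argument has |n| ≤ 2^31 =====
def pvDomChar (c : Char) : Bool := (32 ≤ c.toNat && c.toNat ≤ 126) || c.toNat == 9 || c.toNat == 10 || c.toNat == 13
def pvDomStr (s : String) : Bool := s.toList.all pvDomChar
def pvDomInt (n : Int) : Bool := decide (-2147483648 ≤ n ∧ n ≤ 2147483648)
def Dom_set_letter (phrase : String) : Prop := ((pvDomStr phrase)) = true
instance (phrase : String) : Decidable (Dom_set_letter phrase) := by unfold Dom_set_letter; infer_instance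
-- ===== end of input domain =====

-- B replaces A's single accumulating try/except pass with dict.fromkeys + a per-letter
-- index comprehension (idiomatic alternative; not faster).


-- ===== PORT A =====
-- map = {}; for index, letter in enumerate(phrase): try map[letter].append(index)
--                                                   except KeyError: map[letter] = [index]
def set_letter (phrase : String) : List (String × List Int) :=
  ((PySem.List.enumerate phrase.toList).foldl
    (fun m p =>
      match PySem.Dict.get? m (String.ofList [p.2]) with
      | some v => PySem.Dict.insert m (String.ofList [p.2]) (v ++ [p.1])  -- map[letter].append(index)
      | none   => PySem.Dict.insert m (String.ofList [p.2]) [p.1])        -- map[letter] = list(); append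
    (PySem.Dict.mk [])).items

-- ===== PORT B =====
-- {letter: [i for i, c in enumerate(phrase) if c == letter] for letter in dict.fromkeys(phrase)}
def set_letter_alt (phrase : String) : List (String × List Int) :=
  (PySem.List.dedup phrase.toList).map
    (fun letter =>
      (String.ofList [letter],
       (PySem.List.enumerate phrase.toList).filterMap
         (fun p => if p.2 == letter then some p.1 else none)))

-- ===== PRECONDITION & SPEC =====
def Spec_set_letter (phrase : String) (out : List (String × List Int)) : Prop := out = set_letter_alt phrase
instance (phrase : String) (out : List (String × List Int)) : Decidable (Spec_set_letter phrase out) := by unfold Spec_set_letter; infer_instance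

-- ===== CLAIM (what is proved, stated in full; the proofs are below) =====
def Claim_equal_set_letter : Prop := ∀ (phrase : String), Dom_set_letter phrase → Spec_set_letter phrase (set_letter phrase)

-- ===== LEMMAS AND PROOFS =====

-- a comprehension with a filter clause is map-after-filter
lemma filterMap_if {α β : Type} (q : α → Bool) (g : α → β) (l : List α) :
    l.filterMap (fun p => if q p then some (g p) else none) = (l.filter q).map g := by
  induction l with
  | nil => rfl
  | cons x xs ih =>
    by_cases h : q x = true <;> simp [h, ih]

-- the 1-char-string key map is injective
lemma key_inj : Function.Injective (fun c : Char => String.ofList [c]) := by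
  intro a b h
  have h2 := congrArg String.toList h
  simpa using h2

-- ordered dedup commutes with an injective map
lemma ofList_map_inj {f : Char → String} (hf : Function.Injective f) (xs : List Char) :
    PySem.Set.ofList (xs.map f) = (PySem.Set.ofList xs).map f := by
  induction xs using List.reverseRecOn with
  | nil => simp [PySem.Set.ofList_nil]
  | append_singleton xs x ih =>
    rw [List.map_append, List.map_singleton, PySem.Set.ofList_append_singleton,
        PySem.Set.ofList_append_singleton, ih]
    by_cases h : x ∈ PySem.Set.ofList xs
    · have hx : f x ∈ (PySem.Set.ofList xs).map f := List.mem_map_of_mem h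
      simp [PySem.Set.add, PySem.Set.contains, h, hx]
    · have h2 : f x ∉ (PySem.Set.ofList xs).map f := by
        simp only [List.mem_map]
        rintro ⟨a, ha, hfa⟩
        exact h (hf hfa ▸ ha)
      simp [PySem.Set.add, PySem.Set.contains, h, h2]

-- a dict with nodup keys is its key list paired with its lookups
lemma items_aux (l : List (String × List Int)) (h : (l.map (·.1)).Nodup) :
    l = (l.map (·.1)).map (fun k => (k, (PySem.Dict.mk l).getD k [])) := by
  induction l with
  | nil => rfl
  | cons p rest ih =>
    obtain ⟨k, v⟩ := p
    simp only [List.map_cons, List.nodup_cons] at h ⊢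
    refine List.cons_eq_cons.mpr ⟨?_, ?_⟩
    · simp [PySem.Dict.getD, PySem.Dict.get?_mk_cons]
    · conv_lhs => rw [ih h.2]
      refine List.map_congr_left ?_
      intro k' hk'
      have hne : (k == k') = false := by
        simp only [beq_eq_false_iff_ne, ne_eq]
        rintro rfl
        exact h.1 hk'
      simp [PySem.Dict.getD, PySem.Dict.get?_mk_cons, hne]

-- A's try/except step is exactly Dict.modify with default []
lemma step_eq_modify :
    (fun (m : PySem.Dict String (List Int)) (p : Int × Char) =>
      match PySem.Dict.get? m (String.ofList [p.2]) with
      | some v => PySem.Dict.insert m (String.ofList [p.2]) (v ++ [p.1])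
      | none   => PySem.Dict.insert m (String.ofList [p.2]) [p.1])
    = (fun m p => PySem.Dict.modify m (String.ofList [p.2]) [] (· ++ [p.1])) := by
  funext m p
  simp only [PySem.Dict.modify, PySem.Dict.getD]
  cases PySem.Dict.get? m (String.ofList [p.2]) <;> simp

theorem main_eq (phrase : String) : set_letter phrase = set_letter_alt phrase := by
  unfold set_letter set_letter_alt
  rw [step_eq_modify]
  set xs := phrase.toList with hxs
  set d : PySem.Dict String (List Int) :=
    (PySem.List.enumerate xs).foldl
      (fun m p => PySem.Dict.modify m (String.ofList [p.2]) [] (· ++ [p.1]))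
      (PySem.Dict.mk []) with hd
  have hkeys : d.keys = (PySem.Set.ofList xs).map (fun c => String.ofList [c]) := by
    rw [hd, PySem.Dict.keys_foldl_modify_key (PySem.List.enumerate xs)
          (fun p => String.ofList [p.2]) [] (fun _ p => (· ++ [p.1]))]
    show PySem.Set.update (PySem.Dict.mk ([] : List (String × List Int))).keys _ = _
    have : (PySem.List.enumerate xs).map (fun p => String.ofList [p.2])
        = xs.map (fun c => String.ofList [c]) := by
      rw [show (fun p : Int × Char => String.ofList [p.2])
            = (fun c : Char => String.ofList [c]) ∘ (fun p : Int × Char => p.2) from rfl,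
          ← List.map_map, PySem.List.map_snd_enumerate]
    rw [this]
    show List.foldl PySem.Set.add [] _ = _
    rw [← PySem.Set.ofList_eq_foldl, ofList_map_inj key_inj]
  have hnodup : d.keys.Nodup := by
    rw [hd]
    exact PySem.Dict.nodup_keys_foldl_modify_key (PySem.List.enumerate xs)
      (fun p => String.ofList [p.2]) [] (fun _ p => (· ++ [p.1])) (PySem.Dict.mk [])
      (by simp [PySem.Dict.keys])
  have hgetD : ∀ c : Char, d.getD (String.ofList [c]) []
      = (PySem.List.enumerate xs).filterMap (fun p => if p.2 == c then some p.1 else none) := by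
    intro c
    have hfold : d = ((PySem.List.enumerate xs).map (fun p => (String.ofList [p.2], p.1))).foldl
        (fun m q => PySem.Dict.modify m q.1 [] (· ++ [q.2])) (PySem.Dict.mk []) := by
      rw [hd, List.foldl_map]
    rw [hfold, PySem.Dict.getD_foldl_modify_append]
    rw [List.filter_map, List.map_map]
    rw [filterMap_if (fun p : Int × Char => p.2 == c) (fun p => p.1)]
    have : List.filter ((fun q : String × Int => q.1 == String.ofList [c]) ∘ fun p : Int × Char => (String.ofList [p.2], p.1)) (PySem.List.enumerate xs)
        = List.filter (fun p : Int × Char => p.2 == c) (PySem.List.enumerate xs) := by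
      apply List.filter_congr
      intro p _
      show (String.ofList [p.2] == String.ofList [c]) = (p.2 == c)
      by_cases h : p.2 = c
      · simp [h]
      · have : String.ofList [p.2] ≠ String.ofList [c] := fun he => h (key_inj he)
        simp [h, this]
    rw [this]
    simp [PySem.Dict.getD, PySem.Dict.get?, Function.comp]
  have h1 : d.items = d.keys.map (fun k => (k, d.getD k [])) :=
    items_aux d.items (by simpa [PySem.Dict.keys] using hnodup)
  rw [h1, hkeys, List.map_map, PySem.List.dedup_eq_ofList]
  apply List.map_congr_left
  intro c _
  show (String.ofList [c], d.getD (String.ofList [c]) []) = _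
  rw [hgetD c]

-- ===== VERDICT (by name: the statement is the Claim_ definition above) =====
theorem set_letter_spec : Claim_equal_set_letter := by
  intro phrase _
  unfold Spec_set_letter
  exact main_eq phrase
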